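-- pv_equiv track=rewrite | github.com/thehaung/DSnA | Python/binary_search/longest-subsequence-with-limited-sum.py | v1PrefixSum
-- ===== SOURCE A (Python) =====
-- from itertools import accumulate
-- from typing import List
--
-- def v1PrefixSum(nums: List[int], queries: List[int]) -> List[int]:
--     n, m = len(nums), len(queries)
--     prefixSum = list(accumulate(sorted(nums)))
--
--     ans = [0] * m
--     for i in range(m):
--         for j in range(n):
--             if prefixSum[j] <= queries[i]:
--                 ans[i] = j + 1
--             else:
--                 break
--     return ans
-- ===== SOURCE B (Python) =====
-- from itertools import accumulate
-- from bisect import bisect_right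
--
-- def v1PrefixSum(nums, queries):
--     prefix = list(accumulate(sorted(nums)))
--     runmax = list(accumulate(prefix, max))
--     return [bisect_right(runmax, q) for q in queries]
-- ===== Notes on version B (the rewrite author's own statement) =====
-- stated objective: faster
-- what changed: Replaced the per-query linear scan of the prefix-sum array by a per-query binary search (bisect_right) on the running maximum of the prefix sums, which is monotone even when nums contains negatives.
import Mathlib
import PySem

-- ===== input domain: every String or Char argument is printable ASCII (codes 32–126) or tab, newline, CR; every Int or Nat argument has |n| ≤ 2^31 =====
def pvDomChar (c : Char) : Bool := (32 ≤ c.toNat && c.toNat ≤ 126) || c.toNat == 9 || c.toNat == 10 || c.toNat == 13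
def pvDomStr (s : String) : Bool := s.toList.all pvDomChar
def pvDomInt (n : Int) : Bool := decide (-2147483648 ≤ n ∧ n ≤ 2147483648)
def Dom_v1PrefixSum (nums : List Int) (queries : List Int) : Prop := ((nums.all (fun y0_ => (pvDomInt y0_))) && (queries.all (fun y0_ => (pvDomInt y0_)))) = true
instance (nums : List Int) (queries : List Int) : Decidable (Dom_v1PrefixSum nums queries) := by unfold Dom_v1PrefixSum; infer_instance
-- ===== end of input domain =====

-- B replaces A's per-query linear scan by bisect_right on the running maximum of the
-- prefix sums (monotone even for negative nums): O(n log n + m*n) -> O((n+m) log n).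

-- shared helper: list(accumulate(xs)) — running sums, exact
def pyAccum (s : Int) : List Int → List Int
  | [] => []
  | x :: xs => (s + x) :: pyAccum (s + x) xs

-- ===== PORT A =====
-- inner 'for j in range(n): if prefixSum[j] <= q: ans[i] = j + 1 else: break'
-- (structural recursion over prefixSum with the index counter j and current ans[i])
def aInner (q : Int) : List Int → Int → Int → Int
  | [], _, ans => ans
  | p :: ps, j, ans => if p ≤ q then aInner q ps (j + 1) (j + 1) else ans

def v1PrefixSum (nums : List Int) (queries : List Int) : List Int :=
  let m := queries.length
  let prefixSum := pyAccum 0 (PySem.List.sorted nums (fun x => x))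
  let ans := List.replicate m (0 : Int)
  (List.range m).foldl
    (fun ans i => ans.set i (aInner (queries.getD i 0) prefixSum 0 (ans.getD i 0))) ans

-- ===== PORT B =====
-- list(accumulate(prefix, max)) — running maxima, exact
def runMaxAux (m : Int) : List Int → List Int
  | [] => []
  | x :: xs => (max m x) :: runMaxAux (max m x) xs

def runMaxL : List Int → List Int
  | [] => []
  | x :: xs => x :: runMaxAux x xs

-- bisect.bisect_right(r, q) with lo = 0, hi = len(r); Nat lo/hi is exact here since
-- Python's lo, hi stay nonnegative and (lo+hi)//2 is Nat division on nonnegatives;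
-- r[mid] is always in range (mid < hi ≤ len r), so getD is exact.
def bisAux (r : List Int) (q : Int) (lo hi : Nat) : Nat :=
  if h : lo < hi then
    let mid := (lo + hi) / 2
    if q < r.getD mid 0 then bisAux r q lo mid else bisAux r q (mid + 1) hi
  else lo
  termination_by hi - lo
  decreasing_by all_goals omega

def bisectRight (r : List Int) (q : Int) : Nat := bisAux r q 0 r.length

def v1PrefixSum_alt (nums : List Int) (queries : List Int) : List Int :=
  let pre := pyAccum 0 (PySem.List.sorted nums (fun x => x))
  let runmax := runMaxL pre
  queries.map (fun q => (bisectRight runmax q : Int))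

-- ===== PRECONDITION & SPEC =====
def Spec_v1PrefixSum (nums : List Int) (queries : List Int) (out : List Int) : Prop := out = v1PrefixSum_alt nums queries
instance (nums : List Int) (queries : List Int) (out : List Int) : Decidable (Spec_v1PrefixSum nums queries out) := by unfold Spec_v1PrefixSum; infer_instance

-- ===== CLAIM (what is proved, stated in full; the proofs are below) =====
def Claim_equal_v1PrefixSum : Prop := ∀ (nums : List Int) (queries : List Int), Dom_v1PrefixSum nums queries → Spec_v1PrefixSum nums queries (v1PrefixSum nums queries)

-- ===== LEMMAS AND PROOFS =====

-- length of the longest prefix of r all of whose elements are ≤ q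
def tc (q : Int) : List Int → Nat
  | [] => 0
  | x :: xs => if x ≤ q then tc q xs + 1 else 0

-- A's inner loop computes j plus the longest all-≤-q prefix length
theorem aInner_eq_tc (q : Int) : ∀ (xs : List Int) (j : Int),
    aInner q xs j j = j + (tc q xs : Int) := by
  intro xs
  induction xs with
  | nil => intro j; simp [aInner, tc]
  | cons x xs ih =>
    intro j
    by_cases h : x ≤ q
    · simp only [aInner, tc, h, if_pos, ih (j + 1)]; push_cast; ring
    · simp [aInner, tc, h]

-- running max over the same ≤-q prefix does not change tc
theorem tc_runMaxAux (q m : Int) (hm : m ≤ q) : ∀ xs : List Int,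
    tc q (runMaxAux m xs) = tc q xs := by
  intro xs
  induction xs generalizing m with
  | nil => simp [runMaxAux, tc]
  | cons x xs ih =>
    by_cases h : x ≤ q
    · have hmx : max m x ≤ q := by omega
      simp [runMaxAux, tc, h, hmx, ih _ hmx]
    · have hmx : ¬ max m x ≤ q := by omega
      simp [runMaxAux, tc, h, hmx]

theorem tc_runMaxL (q : Int) (p : List Int) : tc q (runMaxL p) = tc q p := by
  cases p with
  | nil => rfl
  | cons x xs =>
    by_cases h : x ≤ q
    · simp [runMaxL, tc, h, tc_runMaxAux q x h xs]
    · simp [runMaxL, tc, h]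

-- elements of runMaxAux m xs are ≥ m, and the list is nondecreasing
theorem runMaxAux_mono (m : Int) (xs : List Int) :
    (∀ y ∈ runMaxAux m xs, m ≤ y) ∧ (runMaxAux m xs).Pairwise (· ≤ ·) := by
  induction xs generalizing m with
  | nil => simp [runMaxAux]
  | cons x xs ih =>
    obtain ⟨h1, h2⟩ := ih (max m x)
    refine ⟨?_, ?_⟩
    · intro y hy
      simp [runMaxAux] at hy
      rcases hy with rfl | hy
      · omega
      · have := h1 y hy; omega
    · rw [runMaxAux, List.pairwise_cons]
      exact ⟨h1, h2⟩

theorem runMaxL_pairwise (p : List Int) : (runMaxL p).Pairwise (· ≤ ·) := by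
  cases p with
  | nil => simp [runMaxL]
  | cons x xs =>
    obtain ⟨h1, h2⟩ := runMaxAux_mono x xs
    have hx : ∀ y ∈ runMaxAux x xs, x ≤ y := fun y hy => by
      have := h1 y hy; omega
    rw [runMaxL, List.pairwise_cons]
    exact ⟨hx, h2⟩

-- index facts about tc
theorem tc_le_len (q : Int) (r : List Int) : tc q r ≤ r.length := by
  induction r with
  | nil => simp [tc]
  | cons x xs ih => by_cases h : x ≤ q <;> simp [tc, h] <;> omega

theorem tc_lt_imp (q : Int) : ∀ (r : List Int) (k : Nat), k < tc q r → r.getD k 0 ≤ q := by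
  intro r
  induction r with
  | nil => intro k hk; simp [tc] at hk
  | cons x xs ih =>
    intro k hk
    by_cases h : x ≤ q
    · cases k with
      | zero => simpa using h
      | succ k =>
        simp [tc, h] at hk
        simpa using ih k (by omega)
    · simp [tc, h] at hk

theorem tc_ge_imp (q : Int) : ∀ (r : List Int), r.Pairwise (· ≤ ·) →
    ∀ k : Nat, tc q r ≤ k → k < r.length → q < r.getD k 0 := by
  intro r
  induction r with
  | nil => intro _ k _ hk; simp at hk
  | cons x xs ih =>
    intro hp k htc hk
    rw [List.pairwise_cons] at hp
    by_cases h : x ≤ q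
    · cases k with
      | zero => simp [tc, h] at htc
      | succ k =>
        simp [tc, h] at htc
        simpa using ih hp.2 k (by omega) (by simpa using hk)
    · cases k with
      | zero => simpa using by omega
      | succ k =>
        have hk' : k < xs.length := by simpa using hk
        have hmem : xs.getD k 0 ∈ xs := by
          rw [List.getD_eq_getElem _ _ hk']
          exact List.getElem_mem hk'
        have := hp.1 _ hmem
        have hx : ¬ x ≤ q := h
        simp only [List.getD_cons_succ]
        omega

-- binary search returns tc on a nondecreasing list
theorem bisAux_eq (r : List Int) (q : Int) (hp : r.Pairwise (· ≤ ·)) :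
    ∀ (d lo hi : Nat), hi - lo ≤ d → lo ≤ tc q r → tc q r ≤ hi → hi ≤ r.length →
      bisAux r q lo hi = tc q r := by
  intro d
  induction d with
  | zero =>
    intro lo hi hd h1 h2 h3
    rw [bisAux]
    have : ¬ lo < hi := by omega
    simp [this]; omega
  | succ d ih =>
    intro lo hi hd h1 h2 h3
    rw [bisAux]
    by_cases hlh : lo < hi
    · simp only [hlh, dif_pos]
      by_cases hcmp : q < r.getD ((lo + hi) / 2) 0
      · have hmid : tc q r ≤ (lo + hi) / 2 := by
          by_contra hc
          have := tc_lt_imp q r ((lo + hi) / 2) (by omega)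
          omega
        simp only [hcmp, if_pos]
        exact ih lo ((lo + hi) / 2) (by omega) h1 hmid (by omega)
      · have hmid : (lo + hi) / 2 < tc q r := by
          by_contra hc
          have := tc_ge_imp q r hp ((lo + hi) / 2) (by omega) (by omega)
          omega
        simp only [hcmp]
        exact ih ((lo + hi) / 2 + 1) hi (by omega) (by omega) h2 h3
    · simp [hlh]; omega

theorem bisectRight_eq (r : List Int) (q : Int) (hp : r.Pairwise (· ≤ ·)) :
    bisectRight r q = tc q r :=
  bisAux_eq r q hp r.length 0 r.length (by omega) (by omega) (tc_le_len q r) (by omega)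

-- A's outer loop: setting each slot of [0]*m in order yields the map
-- (F q a0 is the inner loop started from the current cell value a0, which is still 0)
theorem foldl_set_map (qs : List Int) (F : Int → Int → Int) :
    ∀ k ≤ qs.length,
      (List.range k).foldl (fun a i => a.set i (F (qs.getD i 0) (a.getD i 0)))
          (List.replicate qs.length 0)
        = (qs.take k).map (fun q => F q 0) ++ (List.replicate qs.length (0 : Int)).drop k := by
  intro k
  induction k with
  | zero => intro _; simp
  | succ k ih =>
    intro hk
    rw [List.range_succ, List.foldl_append, ih (by omega)]
    simp only [List.foldl_cons, List.foldl_nil]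
    have hlen1 : ((qs.take k).map (fun q => F q 0)).length = k := by
      simp; omega
    have hdrop : (List.replicate qs.length (0 : Int)).drop k
        = 0 :: List.replicate (qs.length - (k + 1)) 0 := by
      rw [List.drop_replicate]
      have : qs.length - k = (qs.length - (k + 1)) + 1 := by omega
      rw [this, List.replicate_succ]
    have hget : ((qs.take k).map (fun q => F q 0)
        ++ (List.replicate qs.length (0 : Int)).drop k).getD k 0 = 0 := by
      rw [List.getD_eq_getElem?_getD, List.getElem?_append_right (by omega), hlen1]
      simp [hdrop]
    rw [hget, List.set_append_right _ _ (by omega), hlen1]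
    have htake : qs.take (k + 1) = qs.take k ++ [qs.getD k 0] := by
      rw [List.take_add_one]
      congr 1
      rw [List.getD_eq_getElem?_getD, List.getElem?_eq_getElem (by omega)]
      simp
    rw [htake, hdrop]
    simp

theorem per_query (nums : List Int) (q : Int) :
    aInner q (pyAccum 0 (PySem.List.sorted nums (fun x => x))) 0 0
      = (bisectRight (runMaxL (pyAccum 0 (PySem.List.sorted nums (fun x => x)))) q : Int) := by
  have h1 := aInner_eq_tc q (pyAccum 0 (PySem.List.sorted nums (fun x => x))) 0
  rw [h1, bisectRight_eq _ q (runMaxL_pairwise _), tc_runMaxL]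
  ring

-- ===== VERDICT (by name: the statement is the Claim_ definition above) =====
theorem v1PrefixSum_spec : Claim_equal_v1PrefixSum := by
  intro nums queries _
  unfold Spec_v1PrefixSum v1PrefixSum v1PrefixSum_alt
  simp only []
  rw [foldl_set_map queries
        (fun q a0 => aInner q (pyAccum 0 (PySem.List.sorted nums (fun x => x))) 0 a0)
        queries.length (by omega)]
  simp only [List.take_length, List.append_nil, List.drop_replicate,
    Nat.sub_self, List.replicate_zero]
  exact List.map_congr_left (fun q _ => per_query nums q)
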